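-- pv_equiv track=rewrite | github.com/ninja-left/CRYPT-GUI | modules/functions.py | generate_possible_keys
-- ===== SOURCE A (Python) =====
-- def generate_possible_keys(
--     length: int,
--     ramp: bool,
--     have_letters: bool,
--     have_symbols: bool,
--     have_numbers: bool,
--     have_space: bool,
--     start_length: int = 1,
-- ) -> int:
--     """
--     This function calculates (Number of options) ^ (Length of password)
--     and if ramp is True, calculate the same for each length and return sum.
--     """
--     total_combinations = 0
--     total_options = 0
--     L = 52  # Letters
--     S = 32  # Symbols (Punctuations)
--     D = 10  # Digits
--     W = 6  # Whitespace
--     if have_letters: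
--         total_options += L
--     if have_symbols:
--         total_options += S
--     if have_numbers:
--         total_options += D
--     if have_space:
--         total_options += W
--     try:
--         start_length = int(start_length)
--     except:
--         start_length = 1
--     if start_length < 1:
--         start_length = 1
--     if ramp:
--         for i in range(start_length, length + 1):
--             t = total_options**i
--             total_combinations += t
--     else:
--         total_combinations = total_options**length
--     return total_combinations
-- ===== SOURCE B (Python) =====
-- def generate_possible_keys(
--     length: int,
--     ramp: bool,
--     have_letters: bool,
--     have_symbols: bool,
--     have_numbers: bool,
--     have_space: bool,
--     start_length: int = 1,
-- ) -> int:
--     # Option count from a table of (flag, size) pairs.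
--     q = 0
--     for flag, n in ((have_letters, 52), (have_symbols, 32),
--                     (have_numbers, 10), (have_space, 6)):
--         if flag:
--             q += n
--     if not ramp:
--         return _pow_bin(q, length)
--     s = start_length if start_length >= 1 else 1
--     if s > length:
--         return 0
--     if q == 1:
--         return length + 1 - s
--     # geometric series closed form: one pair of exponentiations instead of a per-length loop
--     return (_pow_bin(q, length + 1) - _pow_bin(q, s)) // (q - 1)
--
--
-- def _pow_bin(b, e):
--     # binary (square-and-multiply) exponentiation
--     if e <= 0:
--         return 1
--     half = _pow_bin(b * b, e // 2)
--     return b * half if e % 2 == 1 else half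
-- ===== Notes on version B (the rewrite author's own statement) =====
-- stated objective: alternative
-- what changed: Replaces A's loop that computes total_options**i for every length in the range with the geometric-series closed form (q**(length+1) - q**s) // (q - 1) (special cases for empty range and q == 1), the option count folded from a (flag, size) table and the two powers computed by hand-written binary square-and-multiply recursion instead of the built-in **.
-- outside the precondition, e.g. on generate_possible_keys(-1, False, True, False, False, False, 1): A returns 0.019230769230769232, B returns 1
import Mathlib
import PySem

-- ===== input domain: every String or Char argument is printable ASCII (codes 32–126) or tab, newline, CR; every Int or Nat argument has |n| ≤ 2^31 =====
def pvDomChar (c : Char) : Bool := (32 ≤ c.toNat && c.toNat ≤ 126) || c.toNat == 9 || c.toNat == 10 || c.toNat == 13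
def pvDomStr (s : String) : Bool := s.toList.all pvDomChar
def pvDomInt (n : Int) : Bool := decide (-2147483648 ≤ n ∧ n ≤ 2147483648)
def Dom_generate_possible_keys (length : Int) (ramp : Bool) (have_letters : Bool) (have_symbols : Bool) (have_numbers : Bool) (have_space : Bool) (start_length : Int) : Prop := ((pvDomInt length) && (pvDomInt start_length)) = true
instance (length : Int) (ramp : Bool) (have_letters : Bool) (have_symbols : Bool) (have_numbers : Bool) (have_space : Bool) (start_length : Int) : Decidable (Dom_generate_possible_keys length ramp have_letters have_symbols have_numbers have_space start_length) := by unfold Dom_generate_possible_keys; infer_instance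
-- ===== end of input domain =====

-- B replaces A's per-length power loop by the geometric-series closed form, with powers
-- computed by hand-written binary square-and-multiply recursion.

-- ===== PORT A =====
-- Literal port of A.  '**' is ported as '^ ·.toNat', exact because on Pre_ every exponent is ≥ 0
-- (loop indices are ≥ start_length ≥ 1; the non-ramp branch requires 0 ≤ length).
-- 'int(start_length)' is a no-op on an int and is not ported.
def generate_possible_keys (length : Int) (ramp : Bool) (have_letters : Bool) (have_symbols : Bool) (have_numbers : Bool) (have_space : Bool) (start_length : Int) : Int :=
  let total_options : Int :=
    (if have_letters then 52 else 0) + (if have_symbols then 32 else 0) +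
    (if have_numbers then 10 else 0) + (if have_space then 6 else 0)
  let start_length : Int := if start_length < 1 then 1 else start_length
  if ramp then
    (PySem.List.pyRange start_length (length + 1) 1).foldl
      (fun total_combinations i => total_combinations + total_options ^ i.toNat) 0
  else
    total_options ^ length.toNat

-- ===== PORT B =====
-- Literal port of Source B's _pow_bin (Python's e // 2 and e % 2 are PySem.Int.floordiv/mod;
-- the 'e <= 0: return 1' base matches Source B, which only calls it with e ≥ 0 on Pre_).
def pvPowBin (b : Int) (e : Int) : Int :=
  if e ≤ 0 then 1
  else
    let half := pvPowBin (b * b) (PySem.Int.floordiv e 2)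
    if PySem.Int.mod e 2 = 1 then b * half else half
termination_by e.toNat
decreasing_by
  rw [PySem.Int.floordiv_eq_ediv_of_pos (by omega)]
  omega

-- Literal port of Source B: option count folded from the (flag, size) table, then the
-- geometric-series closed form ('//' is PySem.Int.floordiv).
def generate_possible_keys_alt (length : Int) (ramp : Bool) (have_letters : Bool) (have_symbols : Bool) (have_numbers : Bool) (have_space : Bool) (start_length : Int) : Int :=
  let q : Int :=
    [(have_letters, (52:Int)), (have_symbols, 32), (have_numbers, 10), (have_space, 6)].foldl
      (fun q p => if p.1 then q + p.2 else q) 0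
  if ramp = false then
    pvPowBin q length
  else
    let s : Int := if 1 ≤ start_length then start_length else 1
    if length < s then 0
    else if q = 1 then length + 1 - s
    else PySem.Int.floordiv (pvPowBin q (length + 1) - pvPowBin q s) (q - 1)

-- ===== PRECONDITION & SPEC =====
-- Pre_ excludes ramp = false with length < 0: there Python's q**length is a float
-- (or raises ZeroDivisionError when q = 0), not a value of the declared int type.
def Pre_generate_possible_keys (length : Int) (ramp : Bool) (have_letters : Bool) (have_symbols : Bool) (have_numbers : Bool) (have_space : Bool) (start_length : Int) : Prop :=
  ramp = true ∨ 0 ≤ length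
instance (length : Int) (ramp : Bool) (have_letters : Bool) (have_symbols : Bool) (have_numbers : Bool) (have_space : Bool) (start_length : Int) : Decidable (Pre_generate_possible_keys length ramp have_letters have_symbols have_numbers have_space start_length) := by unfold Pre_generate_possible_keys; infer_instance

def pvWitness_generate_possible_keys : Int × Bool × Bool × Bool × Bool × Bool × Int := (5, true, true, false, true, false, 2)

def Spec_generate_possible_keys (length : Int) (ramp : Bool) (have_letters : Bool) (have_symbols : Bool) (have_numbers : Bool) (have_space : Bool) (start_length : Int) (out : Int) : Prop := out = generate_possible_keys_alt length ramp have_letters have_symbols have_numbers have_space start_length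
instance (length : Int) (ramp : Bool) (have_letters : Bool) (have_symbols : Bool) (have_numbers : Bool) (have_space : Bool) (start_length : Int) (out : Int) : Decidable (Spec_generate_possible_keys length ramp have_letters have_symbols have_numbers have_space start_length out) := by unfold Spec_generate_possible_keys; infer_instance

-- ===== CLAIM (what is proved, stated in full; the proofs are below) =====
def Claim_equal_generate_possible_keys : Prop := ∀ (length : Int) (ramp : Bool) (have_letters : Bool) (have_symbols : Bool) (have_numbers : Bool) (have_space : Bool) (start_length : Int), Dom_generate_possible_keys length ramp have_letters have_symbols have_numbers have_space start_length → Pre_generate_possible_keys length ramp have_letters have_symbols have_numbers have_space start_length → Spec_generate_possible_keys length ramp have_letters have_symbols have_numbers have_space start_length (generate_possible_keys length ramp have_letters have_symbols have_numbers have_space start_length)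

-- ===== LEMMAS AND PROOFS =====

-- Binary exponentiation computes the power.
theorem pvPowBin_eq (n : ℕ) : ∀ (b e : Int), e.toNat = n → pvPowBin b e = b ^ n := by
  induction n using Nat.strong_induction_on with
  | _ n ih =>
    intro b e hn
    unfold pvPowBin
    by_cases h0 : e ≤ 0
    · rw [if_pos h0]
      have : n = 0 := by omega
      simp [this]
    · rw [if_neg h0]
      push_neg at h0
      rw [PySem.Int.floordiv_eq_ediv_of_pos (by omega), PySem.Int.mod_eq_emod_of_pos (by omega)]
      have hm : (e / 2).toNat < n := by omega
      rw [ih _ hm (b * b) (e / 2) rfl]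
      have hb2 : b * b = b ^ 2 := by ring
      rw [hb2, ← pow_mul]
      by_cases hodd : e % 2 = 1
      · rw [if_pos hodd]
        have : n = 2 * (e / 2).toNat + 1 := by omega
        rw [this, pow_succ]
        ring
      · rw [if_neg hodd]
        have : n = 2 * (e / 2).toNat := by omega
        rw [this]

-- (q-1) times the partial geometric sum telescopes.
theorem gsum_mul (q s : Int) (hs : 1 ≤ s) : ∀ n : ℕ,
    (q - 1) * ((PySem.List.pyRange s (s + n) 1).foldl
        (fun acc i => acc + q ^ i.toNat) 0)
      = q ^ (s + (n : Int)).toNat - q ^ s.toNat := by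
  intro n
  induction n with
  | zero =>
      rw [PySem.List.pyRange_one_eq_nil (by omega : s + ((0:ℕ) : Int) ≤ s)]
      simp
  | succ n ih =>
      have hb : (s + (((n+1:ℕ)) : Int)) = (s + (n : Int)) + 1 := by push_cast; ring
      rw [hb, PySem.List.pyRange_one_succ_right (by omega : s ≤ s + (n : Int)),
        List.foldl_append]
      have ht : ((s + (n : Int)) + 1).toNat = (s + (n : Int)).toNat + 1 := by omega
      simp only [List.foldl, ht, pow_succ, mul_add, ih]
      ring

theorem floordiv_mul_cancel (a b : Int) (h : b ≠ 0) : PySem.Int.floordiv (b * a) b = a := by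
  simp [PySem.Int.floordiv, Int.mul_fdiv_cancel_left a h]

-- ===== VERDICT (by name: the statement is the Claim_ definition above) =====
theorem generate_possible_keys_spec : Claim_equal_generate_possible_keys := by
  intro length ramp have_letters have_symbols have_numbers have_space start_length _ hpre
  unfold Spec_generate_possible_keys generate_possible_keys generate_possible_keys_alt
  have hqfold :
      ([(have_letters, (52:Int)), (have_symbols, 32), (have_numbers, 10), (have_space, 6)].foldl
        (fun q p => if p.1 then q + p.2 else q) 0)
      = (if have_letters then 52 else 0) + (if have_symbols then 32 else 0) +
        (if have_numbers then 10 else 0) + (if have_space then 6 else 0) := by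
    cases have_letters <;> cases have_symbols <;> cases have_numbers <;> cases have_space <;> decide
  rw [hqfold]
  set q : Int :=
    (if have_letters then 52 else 0) + (if have_symbols then 32 else 0) +
    (if have_numbers then 10 else 0) + (if have_space then 6 else 0) with hq
  cases ramp with
  | false =>
      simp only [Bool.false_eq_true, if_false]
      rcases hpre with h | h
      · exact absurd h (by decide)
      · rw [pvPowBin_eq length.toNat q length rfl]
        simp
  | true =>
      have hsif : (if 1 ≤ start_length then start_length else 1)
          = if start_length < 1 then 1 else start_length := by split_ifs <;> omega
      rw [hsif]
      simp only [Bool.true_eq_false, if_false]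
      set s : Int := if start_length < 1 then 1 else start_length with hsdef
      have hs : 1 ≤ s := by rw [hsdef]; split_ifs <;> omega
      by_cases hlt : length < s
      · rw [if_pos hlt, PySem.List.pyRange_one_eq_nil (by omega : length + 1 ≤ s)]
        simp
      · rw [if_neg hlt]
        have hq1 : q ≠ 1 := by
          rw [hq]; cases have_letters <;> cases have_symbols <;>
            cases have_numbers <;> cases have_space <;> decide
        rw [if_neg hq1]
        rw [pvPowBin_eq (length + 1).toNat q (length + 1) rfl,
            pvPowBin_eq s.toNat q s rfl]
        have hn : s + (((length + 1 - s).toNat : ℕ) : Int) = length + 1 := by omega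
        have := gsum_mul q s hs (length + 1 - s).toNat
        rw [hn] at this
        rw [← this, floordiv_mul_cancel _ _ (by omega : q - 1 ≠ 0)]
        simp
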